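-- pv_equiv track=rewrite | github.com/ClazOS/swoopCode | Practice/codingBatWarmups.py | string_matchAlt
-- ===== SOURCE A (Python) =====
-- def string_matchAlt(a, b):
--   # Figure which string is shorter.
--   shorter = min(len(a), len(b))
--   count = 0
--
--   # Loop i over every substring starting spot.
--   # Use length-1 here, so can use char str[i+1] in the loop
--   for i in range(shorter-1):
--     a_sub = a[i:i+2]
--     b_sub = b[i:i+2]
--     if a_sub == b_sub:
--       count = count + 1
--
--   return count
-- ===== SOURCE B (Python) =====
-- def string_matchAlt(a, b):
--   # First pass: per-position character match table over the overlap.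
--   m = [x == y for x, y in zip(a, b)]
--   # Second pass: count consecutive True pairs in the match table.
--   count = 0
--   for i in range(len(m) - 1):
--     if m[i] and m[i + 1]:
--       count += 1
--   return count
-- ===== Notes on version B (the rewrite author's own statement) =====
-- stated objective: alternative
-- what changed: Replaces per-index 2-char slice comparisons with a two-pass decomposition: first build a boolean per-character match table over the zipped overlap, then count consecutive True pairs in it.
import Mathlib
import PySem

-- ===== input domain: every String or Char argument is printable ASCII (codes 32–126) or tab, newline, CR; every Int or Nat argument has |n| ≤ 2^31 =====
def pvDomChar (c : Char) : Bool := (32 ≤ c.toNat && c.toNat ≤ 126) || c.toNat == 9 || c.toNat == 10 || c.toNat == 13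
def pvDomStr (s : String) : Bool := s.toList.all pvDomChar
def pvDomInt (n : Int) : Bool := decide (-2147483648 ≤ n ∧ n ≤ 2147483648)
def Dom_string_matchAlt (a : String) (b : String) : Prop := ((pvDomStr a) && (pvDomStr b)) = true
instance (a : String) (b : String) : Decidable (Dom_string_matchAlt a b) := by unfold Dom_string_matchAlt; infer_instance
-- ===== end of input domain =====

-- B replaces A's per-index 2-char slice comparisons by a two-pass decomposition
-- (per-character match table, then counting consecutive True pairs); same cost.

-- ===== PORT A =====
-- string slices a[i:i+2] are ported as PySem.List.slice on a.toList (exact: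
-- Python string equality of the slices = equality of their character lists).
def string_matchAlt (a : String) (b : String) : Int :=
  let shorter : Int := min (PySem.Str.len a) (PySem.Str.len b)
  (PySem.List.pyRange 0 (shorter - 1) 1).foldl (fun count i =>
    let a_sub := PySem.List.slice a.toList (some i) (some (i + 2))
    let b_sub := PySem.List.slice b.toList (some i) (some (i + 2))
    if a_sub = b_sub then count + 1 else count) 0

-- ===== PORT B =====
-- zip(a, b) with the comprehension → List.zipWith; m[i] → PySem.List.pyGetD
def string_matchAlt_alt (a : String) (b : String) : Int :=
  let m : List Bool := List.zipWith (fun x y => x == y) a.toList b.toList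
  (PySem.List.pyRange 0 ((m.length : Int) - 1) 1).foldl (fun count i =>
    if PySem.List.pyGetD m i false && PySem.List.pyGetD m (i + 1) false
    then count + 1 else count) 0

-- ===== PRECONDITION & SPEC =====
def Spec_string_matchAlt (a : String) (b : String) (out : Int) : Prop := out = string_matchAlt_alt a b
instance (a : String) (b : String) (out : Int) : Decidable (Spec_string_matchAlt a b out) := by unfold Spec_string_matchAlt; infer_instance

-- ===== CLAIM (what is proved, stated in full; the proofs are below) =====
def Claim_equal_string_matchAlt : Prop := ∀ (a : String) (b : String), Dom_string_matchAlt a b → Spec_string_matchAlt a b (string_matchAlt a b)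

-- ===== LEMMAS AND PROOFS =====

-- the two slices are 2-element lists when i+1 < length of both
lemma drop_take_two {α : Type} (l : List α) (k : Nat) (h : k + 1 < l.length) :
    (l.drop k).take 2 = [l[k], l[k+1]] := by
  rw [List.drop_eq_getElem_cons (l := l) (i := k) (by omega),
      List.drop_eq_getElem_cons (l := l) (i := k+1) h]
  rfl

lemma cond_eq (la lb : List Char) (k : Nat)
    (h : k + 1 < min la.length lb.length) :
    (PySem.List.slice la (some (k : Int)) (some ((k : Int) + 2)) =
     PySem.List.slice lb (some (k : Int)) (some ((k : Int) + 2)))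
    ↔ ((PySem.List.pyGetD (List.zipWith (fun x y => x == y) la lb) (k : Int) false &&
        PySem.List.pyGetD (List.zipWith (fun x y => x == y) la lb) ((k : Int) + 1) false) = true) := by
  have hka : k + 1 < la.length := by omega
  have hkb : k + 1 < lb.length := by omega
  have hm : k + 1 < (List.zipWith (fun x y : Char => x == y) la lb).length := by
    simp [List.length_zipWith]; omega
  have e1 : ((k : Int) + 2) = ((k + 2 : Nat) : Int) := by push_cast; ring
  have e2 : ((k : Int) + 1) = ((k + 1 : Nat) : Int) := by push_cast; ring
  rw [e1, PySem.List.slice_natCast, PySem.List.slice_natCast, e2,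
      PySem.List.pyGetD_natCast, PySem.List.pyGetD_natCast]
  have : k + 2 - k = 2 := by omega
  rw [this, drop_take_two la k hka, drop_take_two lb k hkb]
  rw [List.getD_eq_getElem _ _ (by omega), List.getD_eq_getElem _ _ hm]
  simp [List.getElem_zipWith]

-- ===== VERDICT (by name: the statement is the Claim_ definition above) =====
theorem string_matchAlt_spec : Claim_equal_string_matchAlt := by
  intro a b _
  unfold Spec_string_matchAlt string_matchAlt string_matchAlt_alt
  simp only [PySem.Str.len_eq, List.length_zipWith]
  have hlen : (min (a.toList.length : Int) (b.toList.length : Int)) =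
      ((min a.toList.length b.toList.length : Nat) : Int) := by
    push_cast; rfl
  rw [hlen]
  apply PySem.List.foldl_congr_mem
  intro acc i hi
  rw [PySem.List.mem_pyRange_one] at hi
  obtain ⟨h0, h1⟩ := hi
  have hk : i = ((i.toNat : Nat) : Int) := by omega
  have hklt : i.toNat + 1 < min a.toList.length b.toList.length := by omega
  rw [hk]
  have := cond_eq a.toList b.toList i.toNat hklt
  by_cases hc : (PySem.List.slice a.toList (some ((i.toNat : Nat) : Int)) (some (((i.toNat : Nat) : Int) + 2)) =
      PySem.List.slice b.toList (some ((i.toNat : Nat) : Int)) (some (((i.toNat : Nat) : Int) + 2)))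
  · rw [if_pos hc, if_pos (this.mp hc)]
  · rw [if_neg hc, if_neg (fun h => hc (this.mpr h))]
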